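-- pv_equiv track=rewrite | github.com/GPatiA2/panel_defect_detection | report_data_generator.py | labels_as_colors
-- ===== SOURCE A (Python) =====
-- def labels_as_colors(lb):
--
--     lb_c = [bin(idx + 1) for idx, _ in enumerate(lb)]
--     lb_c = [lb_c[idx][2:] for idx, _ in enumerate(lb_c)]
--
--     max_len = max(lb_c, key = lambda x : len(x))
--     lb_color_corrected = []
--     for it in lb_c:
--         while len(it) < len(max_len):
--             it = '0' + it
--         lb_color_corrected.append(it)
--
--     lb_c = [[int(it[i]) for i in range(len(it))] for it in lb_color_corrected]
--     return lb_c
-- ===== SOURCE B (Python) =====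
-- def labels_as_colors(lb):
--     n = len(lb)
--     W = max(v.bit_length() for v in range(1, n + 1))
--     return [[(v >> (W - 1 - j)) & 1 for j in range(W)] for v in range(1, n + 1)]
-- ===== Notes on version B (the rewrite author's own statement) =====
-- stated objective: idiomatic
-- what changed: B computes the common width with int.bit_length and extracts each bit by shift-and-mask integer arithmetic, replacing A's bin()-string construction, max-by-string-length scan, while-loop zero-padding and per-character int() parsing.
import Mathlib
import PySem

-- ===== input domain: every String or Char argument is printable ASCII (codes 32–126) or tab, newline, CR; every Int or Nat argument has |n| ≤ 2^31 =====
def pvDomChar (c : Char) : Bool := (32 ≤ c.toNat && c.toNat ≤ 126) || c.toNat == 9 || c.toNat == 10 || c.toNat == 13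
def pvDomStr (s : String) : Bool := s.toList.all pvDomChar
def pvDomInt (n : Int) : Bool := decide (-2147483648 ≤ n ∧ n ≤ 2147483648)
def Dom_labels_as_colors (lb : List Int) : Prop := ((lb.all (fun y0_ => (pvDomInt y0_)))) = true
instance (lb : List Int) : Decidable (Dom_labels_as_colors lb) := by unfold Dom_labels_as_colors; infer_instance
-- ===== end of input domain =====

-- B replaces A's bin()-string building, max-by-string-length scan and while-loop zero-padding
-- by bit_length and shift-and-mask integer arithmetic (objective: idiomatic, same cost).

-- ===== PORT A =====
-- binary digits of a Nat, most significant first (bin(m) for m ≥ 1 is "0b" ++ these)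
def binDigits (m : Nat) : List Char :=
  if h : m = 0 then [] else binDigits (m / 2) ++ [if m % 2 = 1 then '1' else '0']
decreasing_by exact Nat.div_lt_self (Nat.pos_of_ne_zero h) one_lt_two

-- bin(v): Python's bin() (A only calls it on positive values)
def pyBin (v : Int) : List Char :=
  if v < 0 then '-' :: ('0' :: 'b' :: binDigits v.natAbs) else '0' :: 'b' :: binDigits v.toNat

-- the while-loop:  while len(it) < w: it = '0' + it
def padLoop (w : Nat) (it : List Char) : List Char :=
  if it.length < w then padLoop w ('0' :: it) else it
termination_by w - it.length
decreasing_by simp only [List.length_cons]; omega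

def labels_as_colors (lb : List Int) : List (List Int) :=
  let lb_c := (PySem.List.enumerate lb).map (fun p => pyBin (p.1 + 1))
  let lb_c2 := (PySem.List.enumerate lb_c).map
    (fun p => PySem.List.slice ((PySem.List.pyGet? lb_c p.1).getD []) (some 2) none)
  -- max(lb_c, key=len); Python raises ValueError on an empty list (excluded by Pre_)
  let max_len := (PySem.List.max? lb_c2 (fun x => x.length)).getD []
  let lb_color_corrected := lb_c2.foldl (fun acc it => acc ++ [padLoop max_len.length it]) []
  lb_color_corrected.map (fun it =>
    (PySem.List.pyRange 0 (it.length : Int) 1).map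
      (fun i => (PySem.Int.ofChars? [(PySem.List.pyGet? it i).getD ' ']).getD 0))

-- ===== PORT B =====
def labels_as_colors_alt (lb : List Int) : List (List Int) :=
  let n : Int := lb.length
  -- max(v.bit_length() for v in range(1, n+1)); ValueError on empty (excluded by Pre_)
  match PySem.List.max? ((PySem.List.pyRange 1 (n + 1) 1).map PySem.Int.bitLength) (fun x => x) with
  | none => []
  | some W =>
    (PySem.List.pyRange 1 (n + 1) 1).map (fun (v : Int) =>
      (PySem.List.pyRange 0 (W : Int) 1).map (fun (j : Int) =>
        -- (v >> (W-1-j)) & 1 ; the shift amount is ≥ 0 for every j in range(W)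
        PySem.Int.band (v >>> ((W : Int) - 1 - j).toNat) 1))

-- ===== PRECONDITION & SPEC =====
-- Pre_ excludes only the empty list, on which both Pythons raise ValueError (max of an empty sequence).
def Pre_labels_as_colors (lb : List Int) : Prop := lb ≠ []
instance (lb : List Int) : Decidable (Pre_labels_as_colors lb) := by unfold Pre_labels_as_colors; infer_instance
def pvWitness_labels_as_colors : List Int := [7]

def Spec_labels_as_colors (lb : List Int) (out : List (List Int)) : Prop := out = labels_as_colors_alt lb
instance (lb : List Int) (out : List (List Int)) : Decidable (Spec_labels_as_colors lb out) := by unfold Spec_labels_as_colors; infer_instance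

-- ===== CLAIM (what is proved, stated in full; the proofs are below) =====
def Claim_equal_labels_as_colors : Prop := ∀ (lb : List Int), Dom_labels_as_colors lb → Pre_labels_as_colors lb → Spec_labels_as_colors lb (labels_as_colors lb)

-- ===== LEMMAS AND PROOFS =====

-- Nat-level bit length, used only in the proofs
def bL (m : Nat) : Nat := PySem.Int.bitLength (m : Nat)

lemma length_binDigits (m : Nat) : (binDigits m).length = bL m := by
  induction m using Nat.strong_induction_on with
  | _ m ih =>
    unfold binDigits
    split
    · next h => subst h; simp [bL]
    · next h =>
      rw [List.length_append, ih (m / 2) (Nat.div_lt_self (Nat.pos_of_ne_zero h) one_lt_two)]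
      simp [bL, PySem.Int.bitLength_natCast (Nat.pos_of_ne_zero h)]

lemma bL_mono {m n : Nat} (h : m ≤ n) : bL m ≤ bL n := by
  rcases Nat.eq_zero_or_pos m with hm | hm
  · subst hm; simp [bL, PySem.Int.bitLength]; exact Nat.zero_le _
  · have h1 : 2 ^ (bL m - 1) ≤ m := by
      have := PySem.Int.two_pow_bitLength_le (m : Int) (by exact_mod_cast hm.ne')
      simpa [bL] using this
    have h2 : n < 2 ^ bL n := by
      have := PySem.Int.lt_two_pow_bitLength (n : Int)
      simpa [bL] using this
    have : 2 ^ (bL m - 1) < 2 ^ bL n := lt_of_le_of_lt (le_trans h1 h) h2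
    have hlt := (Nat.pow_lt_pow_iff_right (by norm_num : 1 < 2)).mp this
    have hpos : 1 ≤ bL m := by
      have : m ≠ 0 := hm.ne'
      by_contra hb
      have : bL m = 0 := by omega
      have h0 : m < 2 ^ bL m := by
        have := PySem.Int.lt_two_pow_bitLength (m : Int); simpa [bL] using this
      rw [this] at h0; omega
    omega

lemma bL_lt (m : Nat) : m < 2 ^ bL m := by
  have := PySem.Int.lt_two_pow_bitLength (m : Int); simpa [bL] using this

-- padLoop is prepend-zeros
lemma padLoop_eq (w : Nat) (it : List Char) :
    padLoop w it = List.replicate (w - it.length) '0' ++ it := by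
  by_cases h : it.length < w
  · have : w - it.length = (w - (it.length + 1)) + 1 := by omega
    rw [padLoop, if_pos h, padLoop_eq w ('0' :: it)]
    simp only [List.length_cons, this, List.replicate_succ']
    simp
  · rw [padLoop, if_neg h]
    have : w - it.length = 0 := by omega
    simp [this]
termination_by w - it.length
decreasing_by simp only [List.length_cons]; omega

-- the per-character int() used by port A
def charToInt (c : Char) : Int := (PySem.Int.ofChars? [c]).getD 0

lemma charToInt_zero : charToInt '0' = 0 := by decide
lemma charToInt_one : charToInt '1' = 1 := by decide

-- B's bit list at Nat level
def bitsN (m W : Nat) : List Int := (List.range W).map (fun k => ((m >>> (W - 1 - k)) &&& 1 : Nat))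

lemma map_charToInt_binDigits (m : Nat) :
    (binDigits m).map charToInt = bitsN m (bL m) := by
  induction m using Nat.strong_induction_on with
  | _ m ih =>
    unfold binDigits
    split
    · next h => subst h; simp [bitsN, bL]
    · next h =>
      have hpos := Nat.pos_of_ne_zero h
      have hL : bL m = bL (m / 2) + 1 := by
        simp [bL, PySem.Int.bitLength_natCast hpos]
      rw [List.map_append, ih (m / 2) (Nat.div_lt_self hpos one_lt_two), hL]
      set L := bL (m / 2) with hLdef
      have hrange : List.range (L + 1) = List.range L ++ [L] := by simp [List.range_succ]
      simp only [bitsN]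
      rw [hrange, List.map_append]
      congr 1
      · -- high bits: (m >>> (L - k)) &&& 1 = (m/2 >>> (L-1-k)) &&& 1 for k < L
        apply List.map_congr_left
        intro k hk
        have hk' : k < L := List.mem_range.mp hk
        have h1 : L + 1 - 1 - k = (L - 1 - k) + 1 := by omega
        have hsh : m >>> ((L - 1 - k) + 1) = (m / 2) >>> (L - 1 - k) := by
          rw [Nat.shiftRight_eq_div_pow, Nat.shiftRight_eq_div_pow, pow_succ]
          rw [Nat.mul_comm, ← Nat.div_div_eq_div_mul]
        rw [h1, hsh]
      · -- last bit
        simp only [List.map_cons, List.map_nil]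
        have : m >>> (L + 1 - 1 - L) = m := by simp
        rw [this, Nat.and_one_is_mod]
        have h2 : m % 2 = 0 ∨ m % 2 = 1 := Nat.mod_two_eq_zero_or_one m
        rcases h2 with h2 | h2 <;> simp [h2, charToInt_zero, charToInt_one]

lemma bitsN_pad {m L W : Nat} (hm : m < 2 ^ L) (hLW : L ≤ W) :
    bitsN m W = List.replicate (W - L) 0 ++ bitsN m L := by
  have hrep : List.replicate (W - L) (0 : Int) =
      (List.range (W - L)).map (fun _ => (0 : Int)) := by simp
  have hsplit : List.range W = List.range (W - L) ++ (List.range L).map (fun k => (W - L) + k) := by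
    have h := @List.range_add (W - L) L
    rw [Nat.sub_add_cancel hLW] at h
    simpa using h
  unfold bitsN
  rw [hsplit, List.map_append, hrep, List.map_map]
  congr 1
  · apply List.map_congr_left
    intro k hk
    have hk' : k < W - L := List.mem_range.mp hk
    have hsh : m >>> (W - 1 - k) = 0 := by
      rw [Nat.shiftRight_eq_div_pow]
      apply Nat.div_eq_of_lt
      calc m < 2 ^ L := hm
        _ ≤ 2 ^ (W - 1 - k) := Nat.pow_le_pow_right (by norm_num) (by omega)
    simp [hsh]
  · apply List.map_congr_left
    intro k hk
    have hk' : k < L := List.mem_range.mp hk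
    have : W - 1 - (W - L + k) = L - 1 - k := by omega
    simp [Function.comp, this]

-- a nonempty foldl-max returns some member
lemma foldl_max_some {α κ : Type} [LinearOrder κ] (key : α → κ) :
    ∀ (xs : List α) (z : α), ∃ m, List.foldl
      (fun acc x => match acc with
        | none => some x
        | some m => if key m < key x then some x else some m) (some z) xs = some m ∧ (m = z ∨ m ∈ xs) := by
  intro xs
  induction xs with
  | nil => intro z; exact ⟨z, rfl, Or.inl rfl⟩
  | cons y ys ih =>
    intro z
    simp only [List.foldl_cons]
    by_cases h : key z < key y
    · rcases ih y with ⟨m, hm, hc⟩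
      refine ⟨m, by simpa [h] using hm, ?_⟩
      rcases hc with rfl | hc
      · simp
      · simp [hc]
    · rcases ih z with ⟨m, hm, hc⟩
      refine ⟨m, by simpa [h] using hm, ?_⟩
      rcases hc with rfl | hc
      · simp
      · simp [hc]

lemma max?_some_mem {α κ : Type} [LinearOrder κ] (key : α → κ) (xs : List α) (h : xs ≠ []) :
    ∃ m, PySem.List.max? xs key = some m ∧ m ∈ xs := by
  obtain ⟨y, ys, rfl⟩ := List.exists_cons_of_ne_nil h
  rcases foldl_max_some key ys y with ⟨m, hm, hc⟩
  refine ⟨m, ?_, ?_⟩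
  · simpa [PySem.List.max?] using hm
  · rcases hc with rfl | hc
    · simp
    · simp [hc]

-- both programs compute this canonical value (proof-side only)
def canon (n : Nat) : List (List Int) := (List.range n).map (fun k => bitsN (k + 1) (bL n))

lemma map_enumerate_fst {α β : Type} (xs : List α) (g : Int → β) :
    (PySem.List.enumerate xs).map (fun p => g p.1) =
      (PySem.List.pyRange 0 (xs.length : Int) 1).map g := by
  have h := PySem.List.map_fst_enumerate xs 0
  calc (PySem.List.enumerate xs).map (fun p => g p.1)
      = ((PySem.List.enumerate xs).map (·.1)).map g := by rw [List.map_map]; rfl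
    _ = (PySem.List.pyRange 0 (xs.length : Int) 1).map g := by rw [h]; norm_num

lemma map_index_get {α β : Type} (xs : List α) (g : α → β) (d : α) :
    (PySem.List.pyRange 0 (xs.length : Int) 1).map
      (fun i => g ((PySem.List.pyGet? xs i).getD d)) = xs.map g := by
  have hfun : (fun i => g ((PySem.List.pyGet? xs i).getD d)) =
      (fun i => g (PySem.List.pyGetD xs i d)) := rfl
  have hlen : (xs.length : Int) = PySem.List.len xs := by simp [pysem]
  rw [hfun, hlen]
  calc (PySem.List.pyRange 0 (PySem.List.len xs) 1).map (fun i => g (PySem.List.pyGetD xs i d))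
      = ((PySem.List.pyRange 0 (PySem.List.len xs) 1).map (fun j => PySem.List.pyGetD xs j d)).map g := by
        rw [List.map_map]; rfl
    _ = xs.map g := by rw [PySem.List.map_pyGetD_pyRange_zero]

-- A's per-element work on the padded digit string is B's bit list
lemma elt_eq (m W : Nat) (hm : bL m ≤ W) :
    (PySem.List.pyRange 0 (((List.replicate (W - bL m) '0' ++ binDigits m).length : Int)) 1).map
      (fun i => (PySem.Int.ofChars?
        [(PySem.List.pyGet? (List.replicate (W - bL m) '0' ++ binDigits m) i).getD ' ']).getD 0)
      = bitsN m W := by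
  set it := List.replicate (W - bL m) '0' ++ binDigits m with hit
  have hfun : (fun (i : Int) => (PySem.Int.ofChars?
      [(PySem.List.pyGet? it i).getD ' ']).getD 0) =
      (fun i => charToInt ((PySem.List.pyGet? it i).getD ' ')) := rfl
  rw [hfun, map_index_get it charToInt ' ']
  rw [hit, List.map_append, List.map_replicate, charToInt_zero, map_charToInt_binDigits]
  exact (bitsN_pad (bL_lt m) hm).symm

lemma pyRange_one_succ_nat (n : Nat) :
    PySem.List.pyRange 1 ((n : Int) + 1) 1 = (List.range n).map (fun k => ((k + 1 : Nat) : Int)) := by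
  rw [PySem.List.pyRange_one]
  have h1 : ((n : Int) + 1 - 1).toNat = n := by omega
  rw [h1]
  apply List.map_congr_left
  intro k _
  push_cast
  ring

lemma bitsN_cast (k W : Nat) :
    (PySem.List.pyRange 0 (W : Int) 1).map
      (fun (j : Int) => PySem.Int.band (((k + 1 : Nat) : Int) >>> ((W : Int) - 1 - j).toNat) 1)
      = bitsN (k + 1) W := by
  rw [PySem.List.pyRange_zero_nat, List.map_map, bitsN]
  apply List.map_congr_left
  intro i hi
  have hi' : i < W := List.mem_range.mp hi
  have h1 : ((W : Int) - 1 - (i : Int)).toNat = W - 1 - i := by omega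
  simp only [Function.comp]
  rw [h1, ← Int.natCast_shiftRight]
  have := PySem.Int.band_natCast ((k + 1) >>> (W - 1 - i)) 1
  simpa using this

-- B computes canon
lemma B_eq (lb : List Int) (h : lb ≠ []) : labels_as_colors_alt lb = canon lb.length := by
  set n := lb.length with hn
  have hn0 : 0 < n := List.length_pos_of_ne_nil h
  have hrange : PySem.List.pyRange 1 ((n : Int) + 1) 1 =
      (List.range n).map (fun k => ((k + 1 : Nat) : Int)) := pyRange_one_succ_nat n
  have hlist : ((PySem.List.pyRange 1 ((n : Int) + 1) 1).map PySem.Int.bitLength) =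
      (List.range n).map (fun k => bL (k + 1)) := by
    rw [hrange, List.map_map]; rfl
  have hne : (List.range n).map (fun k => bL (k + 1)) ≠ [] := by
    simp [List.range_eq_nil]; omega
  obtain ⟨W, hW, hmem⟩ := max?_some_mem (fun x => x) _ hne
  have hWle : W ≤ bL n := by
    obtain ⟨k, hk, rfl⟩ := List.mem_map.mp hmem
    exact bL_mono (by have := List.mem_range.mp hk; omega)
  have hWge : bL n ≤ W := by
    have hmem' : bL n ∈ (List.range n).map (fun k => bL (k + 1)) := by
      refine List.mem_map.mpr ⟨n - 1, List.mem_range.mpr (by omega), by congr 1; omega⟩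
    exact PySem.List.max?_isMax hW _ hmem'
  have hWval : W = bL n := le_antisymm hWle hWge
  show (match PySem.List.max? ((PySem.List.pyRange 1 ((n : Int) + 1) 1).map PySem.Int.bitLength)
      (fun x => x) with
    | none => []
    | some W =>
      (PySem.List.pyRange 1 ((n : Int) + 1) 1).map (fun (v : Int) =>
        (PySem.List.pyRange 0 (W : Int) 1).map (fun (j : Int) =>
          PySem.Int.band (v >>> ((W : Int) - 1 - j).toNat) 1))) = canon n
  rw [hlist]
  rw [hW]
  simp only []
  rw [hrange, List.map_map, canon, hWval]
  apply List.map_congr_left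
  intro k _
  exact bitsN_cast k (bL n)

-- A computes canon
lemma A_eq (lb : List Int) (h : lb ≠ []) : labels_as_colors lb = canon lb.length := by
  set n := lb.length with hn
  have hn0 : 0 < n := List.length_pos_of_ne_nil h
  -- step 1: lb_c
  have step1 : (PySem.List.enumerate lb).map (fun p => pyBin (p.1 + 1)) =
      (List.range n).map (fun k => '0' :: 'b' :: binDigits (k + 1)) := by
    rw [map_enumerate_fst lb (fun i => pyBin (i + 1)), PySem.List.pyRange_zero_nat, List.map_map]
    apply List.map_congr_left
    intro k _
    simp only [Function.comp]
    rw [pyBin]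
    have h1 : ¬ ((k : Int) + 1 < 0) := by omega
    have h2 : ((k : Int) + 1).toNat = k + 1 := by omega
    rw [if_neg h1, h2]
  set lb_c := (PySem.List.enumerate lb).map (fun p => pyBin (p.1 + 1)) with hlbc
  -- step 2: lb_c2
  have hlen_c : lb_c.length = n := by rw [step1]; simp
  have step2 : (PySem.List.enumerate lb_c).map
      (fun p => PySem.List.slice ((PySem.List.pyGet? lb_c p.1).getD []) (some 2) none) =
      (List.range n).map (fun k => binDigits (k + 1)) := by
    rw [map_enumerate_fst lb_c (fun i =>
        PySem.List.slice ((PySem.List.pyGet? lb_c i).getD []) (some 2) none),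
      map_index_get lb_c (fun s => PySem.List.slice s (some 2) none) []]
    rw [step1, List.map_map]
    apply List.map_congr_left
    intro k _
    simp only [Function.comp]
    rw [PySem.List.slice_from _ (by norm_num : (0 : Int) ≤ 2)]
    rfl
  set lb_c2 := (PySem.List.enumerate lb_c).map
      (fun p => PySem.List.slice ((PySem.List.pyGet? lb_c p.1).getD []) (some 2) none) with hlbc2
  -- step 3: max_len
  have hne : lb_c2 ≠ [] := by rw [step2]; simp [List.range_eq_nil]; omega
  obtain ⟨mx, hmx, hmem⟩ := max?_some_mem (fun x => x.length) lb_c2 hne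
  have hlenmx : mx.length = bL n := by
    apply le_antisymm
    · rw [step2] at hmem
      obtain ⟨k, hk, rfl⟩ := List.mem_map.mp hmem
      rw [length_binDigits]
      exact bL_mono (by have := List.mem_range.mp hk; omega)
    · have hmem' : binDigits n ∈ lb_c2 := by
        rw [step2]
        refine List.mem_map.mpr ⟨n - 1, List.mem_range.mpr (by omega), by congr 1; omega⟩
      have := PySem.List.max?_isMax hmx _ hmem'
      rwa [length_binDigits] at this
  -- assemble
  show (lb_c2.foldl (fun acc it => acc ++
      [padLoop ((PySem.List.max? lb_c2 (fun x => x.length)).getD []).length it]) []).map (fun it =>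
      (PySem.List.pyRange 0 (it.length : Int) 1).map
        (fun i => (PySem.Int.ofChars? [(PySem.List.pyGet? it i).getD ' ']).getD 0)) = canon n
  rw [hmx]
  simp only [Option.getD_some]
  rw [PySem.List.foldl_append_singleton_eq_map, List.nil_append, hlenmx]
  rw [step2, List.map_map, List.map_map, canon]
  apply List.map_congr_left
  intro k hk
  simp only [Function.comp]
  have hle : bL (k + 1) ≤ bL n :=
    bL_mono (by have := List.mem_range.mp hk; omega)
  rw [padLoop_eq, length_binDigits]
  exact elt_eq (k + 1) (bL n) hle

-- ===== VERDICT (by name: the statement is the Claim_ definition above) =====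
theorem labels_as_colors_spec : Claim_equal_labels_as_colors := by
  intro lb _ hpre
  unfold Spec_labels_as_colors
  rw [A_eq lb hpre, B_eq lb hpre]
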